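-- pv_equiv track=rewrite | github.com/nelitoz/quick_examples | Misc_tools/vlantools.py | get_consecutive_integer_series
-- ===== SOURCE A (Python) =====
-- def get_consecutive_integer_series(integer_list):
--     # from https://stackoverflow.com/questions/2361945/detecting-consecutive-integers-in-a-list
--     integer_list = sorted(integer_list)
--     start_item = integer_list[0]
--     end_item = integer_list[-1]
--
--     a = set(integer_list)  # Set a
--     b = range(start_item, end_item+1)
--
--     # Pick items that are not in range.
--     c = set(b) - a  # Set operation b-a
--
--     li = []
--     start = 0
--     for i in sorted(c):
--         end = b.index(i)  # Get end point of the list slicing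
--         li.append(b[start:end])  # Slice list using values
--         start = end + 1  # Increment the start point for next slicing
--     li.append(b[start:])  # Add the last series
--
--     for sliced_list in li:
--         if not sliced_list:
--             # list is empty
--             continue
--         if len(sliced_list) == 1:
--             # If only one item found in list
--             yield str(sliced_list[0])
--         else:
--             yield "{0}-{1}".format(sliced_list[0], sliced_list[-1])
-- ===== SOURCE B (Python) =====
-- def _fmt(a, b):
--     return str(a) if a == b else "{0}-{1}".format(a, b)
--
--
-- def get_consecutive_integer_series(integer_list):
--     # One linear pass over the sorted distinct values, grouping consecutive runs;
--     # never materializes the full integer range between min and max.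
--     run_start = run_end = None
--     for v in sorted(set(integer_list)):
--         if run_start is None:
--             run_start = run_end = v
--         elif v == run_end + 1:
--             run_end = v
--         else:
--             yield _fmt(run_start, run_end)
--             run_start = run_end = v
--     if run_start is not None:
--         yield _fmt(run_start, run_end)
-- ===== Notes on version B (the rewrite author's own statement) =====
-- stated objective: faster
-- what changed: Instead of materializing set(range(min,max+1)), computing the missing values, and slicing the range at each gap, B does one linear pass over the sorted distinct values grouping consecutive runs, never touching the span between min and max.
import Mathlib
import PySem

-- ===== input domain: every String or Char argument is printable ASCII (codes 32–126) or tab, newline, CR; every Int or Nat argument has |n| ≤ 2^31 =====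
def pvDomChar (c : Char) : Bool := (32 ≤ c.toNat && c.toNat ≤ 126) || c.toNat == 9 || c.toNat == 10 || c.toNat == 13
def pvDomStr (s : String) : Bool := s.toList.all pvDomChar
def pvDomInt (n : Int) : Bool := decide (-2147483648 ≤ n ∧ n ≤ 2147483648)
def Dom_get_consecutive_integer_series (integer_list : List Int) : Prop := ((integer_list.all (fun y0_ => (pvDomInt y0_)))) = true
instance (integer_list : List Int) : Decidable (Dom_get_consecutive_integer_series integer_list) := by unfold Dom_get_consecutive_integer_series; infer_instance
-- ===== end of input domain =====

-- B replaces A's "materialize range(min,max+1), subtract the value set, slice the range at each gap"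
-- with one linear pass over the sorted distinct values grouping consecutive runs.
-- Both Pythons are generators; the equivalence is about the yielded sequence, consumed as a list.

-- ===== PORT A =====
-- A's yield loop body, per sliced_list: empty → skipped, singleton → str, else "first-last"
def fmtSliceA (sl : List Int) : List String :=
  match sl with
  | [] => []
  | [x] => [PySem.Int.toStr x]
  | x :: _ :: _ => [PySem.Int.toStr x ++ "-" ++ PySem.Int.toStr ((PySem.List.pyGet? sl (-1)).getD 0)]

def get_consecutive_integer_series (integer_list : List Int) : List String :=
  let il := PySem.List.sorted integer_list (fun x => x) false
  match PySem.List.pyGet? il 0, PySem.List.pyGet? il (-1) with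
  | some start_item, some end_item =>
    let a : PySem.Set Int := PySem.Set.ofList il
    let b := PySem.List.pyRange start_item (end_item + 1) 1
    let c : PySem.Set Int := PySem.Set.diff (PySem.Set.ofList b) a
    let st := (PySem.List.sorted c (fun x => x) false).foldl
      (fun (p : List (List Int) × Int) i =>
        let e : Nat := (PySem.List.index? b i).getD 0
        (p.1 ++ [PySem.List.slice b (some p.2) (some (e : Int))], (e : Int) + 1))
      ([], 0)
    let li := st.1 ++ [PySem.List.slice b (some st.2) none]
    li.foldl (fun acc sl => acc ++ fmtSliceA sl) []
  | _, _ => []  -- Python raises IndexError here (empty list; excluded by Pre_)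

-- ===== PORT B =====
def fmtRunB (a b : Int) : String :=
  if a = b then PySem.Int.toStr a else PySem.Int.toStr a ++ "-" ++ PySem.Int.toStr b

def get_consecutive_integer_series_alt (integer_list : List Int) : List String :=
  let vals := PySem.List.sorted (PySem.Set.ofList integer_list) (fun x => x) false
  let st := vals.foldl
    (fun (p : List String × Option (Int × Int)) v =>
      match p.2 with
      | none => (p.1, some (v, v))
      | some (s, e) =>
        if v = e + 1 then (p.1, some (s, v))
        else (p.1 ++ [fmtRunB s e], some (v, v)))
    ([], none)
  match st.2 with
  | none => st.1
  | some (s, e) => st.1 ++ [fmtRunB s e]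

-- ===== PRECONDITION & SPEC =====
-- Pre_ excludes only the empty list, on which A raises IndexError (integer_list[0]).
def Pre_get_consecutive_integer_series (integer_list : List Int) : Prop := integer_list ≠ []
instance (integer_list : List Int) : Decidable (Pre_get_consecutive_integer_series integer_list) := by unfold Pre_get_consecutive_integer_series; infer_instance
def pvWitness_get_consecutive_integer_series : List Int := [5, 1, 2, 5, 9]

def Spec_get_consecutive_integer_series (integer_list : List Int) (out : List String) : Prop := out = get_consecutive_integer_series_alt integer_list
instance (integer_list : List Int) (out : List String) : Decidable (Spec_get_consecutive_integer_series integer_list out) := by unfold Spec_get_consecutive_integer_series; infer_instance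

-- ===== CLAIM (what is proved, stated in full; the proofs are below) =====
def Claim_equal_get_consecutive_integer_series : Prop := ∀ (integer_list : List Int), Dom_get_consecutive_integer_series integer_list → Pre_get_consecutive_integer_series integer_list → Spec_get_consecutive_integer_series integer_list (get_consecutive_integer_series integer_list)
-- ===== LEMMAS AND PROOFS =====

-- B's run grouping, as a recursion (reference form of B's fold)
def runsAux (s e : Int) : List Int → List String
  | [] => [fmtRunB s e]
  | v :: vs => if v = e + 1 then runsAux s v vs else fmtRunB s e :: runsAux v v vs

def runs : List Int → List String
  | [] => []
  | v :: vs => runsAux v v vs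

theorem foldB_eq_runsAux (vs : List Int) : ∀ (acc : List String) (s e : Int),
    (let st := vs.foldl
      (fun (p : List String × Option (Int × Int)) v =>
        match p.2 with
        | none => (p.1, some (v, v))
        | some (s, e) =>
          if v = e + 1 then (p.1, some (s, v))
          else (p.1 ++ [fmtRunB s e], some (v, v)))
      (acc, some (s, e))
     match st.2 with
     | none => st.1
     | some (s, e) => st.1 ++ [fmtRunB s e]) = acc ++ runsAux s e vs := by
  induction vs with
  | nil => intro acc s e; simp [runsAux]
  | cons v vs ih =>
    intro acc s e
    simp only [List.foldl_cons, runsAux]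
    by_cases h : v = e + 1
    · simp [h, ih]
    · simp [h, ih]

theorem alt_eq_runs (l : List Int) :
    get_consecutive_integer_series_alt l
      = runs (PySem.List.sorted (PySem.Set.ofList l) (fun x => x) false) := by
  unfold get_consecutive_integer_series_alt
  cases h : PySem.List.sorted (PySem.Set.ofList l) (fun x => x) false with
  | nil => simp [runs]
  | cons v vs =>
    simp only [List.foldl_cons, runs]
    have := foldB_eq_runsAux vs [] v v
    simpa using this

-- A's slice-building loop, as a recursion
def sliceOut (b : List Int) : List Int → Int → List (List Int)
  | [], s => [PySem.List.slice b (some s) none]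
  | i :: cs, s =>
    PySem.List.slice b (some s) (some (((PySem.List.index? b i).getD 0 : Nat) : Int))
      :: sliceOut b cs ((((PySem.List.index? b i).getD 0 : Nat) : Int) + 1)

theorem foldA_eq_sliceOut (b : List Int) (cs : List Int) : ∀ (acc : List (List Int)) (s : Int),
    (let st := cs.foldl
      (fun (p : List (List Int) × Int) i =>
        let e : Nat := (PySem.List.index? b i).getD 0
        (p.1 ++ [PySem.List.slice b (some p.2) (some (e : Int))], (e : Int) + 1))
      (acc, s)
     st.1 ++ [PySem.List.slice b (some st.2) none]) = acc ++ sliceOut b cs s := by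
  induction cs with
  | nil => intro acc s; simp [sliceOut]
  | cons i cs ih =>
    intro acc s
    simp only [List.foldl_cons, sliceOut]
    have h := ih (acc ++ [PySem.List.slice b (some s) (some (((PySem.List.index? b i).getD 0 : Nat) : Int))]) ((((PySem.List.index? b i).getD 0 : Nat) : Int) + 1)
    simp only [] at h
    simp only [PySem.List.index?_eq_idxOf?] at h ⊢
    rw [h]
    simp

-- range toolkit
theorem pyRange_drop (a b : Int) (n : Nat) (h : a + n ≤ b) :
    (PySem.List.pyRange a b 1).drop n = PySem.List.pyRange (a + n) b 1 := by
  rw [PySem.List.pyRange_one_append a (a + n) b (by omega) h]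
  rw [List.drop_left' (by rw [PySem.List.length_pyRange_one]; omega)]

theorem pyRange_take (a b : Int) (n : Nat) (h : a + n ≤ b) :
    (PySem.List.pyRange a b 1).take n = PySem.List.pyRange a (a + n) 1 := by
  rw [PySem.List.pyRange_one_append a (a + n) b (by omega) h]
  rw [List.take_left' (by rw [PySem.List.length_pyRange_one]; omega)]

theorem slice_pyRange (lo hi s e : Int) (hs : 0 ≤ s) (hse : s ≤ e) (he : lo + e ≤ hi) :
    PySem.List.slice (PySem.List.pyRange lo hi 1) (some s) (some e)
      = PySem.List.pyRange (lo + s) (lo + e) 1 := by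
  rw [PySem.List.slice_toNat _ hs (by omega)]
  rw [pyRange_drop lo hi s.toNat (by omega)]
  rw [pyRange_take _ hi (e.toNat - s.toNat) (by omega)]
  have h1 : lo + ↑s.toNat + ↑(e.toNat - s.toNat) = lo + e := by omega
  have h2 : lo + (s.toNat : Int) = lo + s := by omega
  rw [h1, h2]

theorem slice_from_pyRange (lo hi s : Int) (hs : 0 ≤ s) (h : lo + s ≤ hi) :
    PySem.List.slice (PySem.List.pyRange lo hi 1) (some s) none
      = PySem.List.pyRange (lo + s) hi 1 := by
  rw [PySem.List.slice_from _ hs, pyRange_drop lo hi s.toNat (by omega)]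
  have h2 : lo + (s.toNat : Int) = lo + s := by omega
  rw [h2]

theorem index?_pyRange (lo hi i : Int) (h1 : lo ≤ i) (h2 : i < hi) :
    PySem.List.index? (PySem.List.pyRange lo hi 1) i = some (i - lo).toNat := by
  rw [PySem.List.index?_eq_some_iff]
  refine ⟨PySem.List.pyRange lo i 1, PySem.List.pyRange (i+1) hi 1, ?_, ?_, ?_⟩
  · rw [← PySem.List.pyRange_one_cons h2, PySem.List.pyRange_one_append lo i hi h1 (by omega)]
  · rw [PySem.List.length_pyRange_one]
  · intro hm
    rw [PySem.List.mem_pyRange_one] at hm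
    omega

theorem fmtSliceA_range (a m : Int) (h : a ≤ m) :
    fmtSliceA (PySem.List.pyRange a (m+1) 1) = [fmtRunB a m] := by
  rcases eq_or_lt_of_le h with rfl | hlt
  · rw [PySem.List.pyRange_one_singleton]
    simp [fmtSliceA, fmtRunB]
  · rw [PySem.List.pyRange_one_cons (by omega)]
    rw [PySem.List.pyRange_one_cons (by omega)]
    have hlast : (a :: (a+1) :: PySem.List.pyRange (a+1+1) (m+1) 1).getLast? = some m := by
      rw [← PySem.List.pyRange_one_cons (by omega : a + 1 < m + 1),
          ← PySem.List.pyRange_one_cons (by omega : a < m + 1)]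
      rw [PySem.List.pyRange_one_succ_right (by omega : a ≤ m)]
      simp
    simp only [fmtSliceA]
    rw [PySem.List.pyGet?_neg_one]
    rw [← PySem.List.pyRange_one_cons (by omega : a + 1 < m + 1)] at hlast ⊢
    rw [hlast]
    simp [fmtRunB]
    omega

theorem runsAux_range (m : Int) : ∀ (k : Nat) (e : Int), (m - e).toNat = k → e ≤ m →
    ∀ (rest : List Int) (s : Int), (∀ h' ∈ rest.head?, h' ≠ m + 1) →
    runsAux s e (PySem.List.pyRange (e+1) (m+1) 1 ++ rest) = runsAux s m rest := by
  intro k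
  induction k with
  | zero =>
    intro e hk he rest s _
    have : e = m := by omega
    subst this
    rw [PySem.List.pyRange_one_eq_nil (by omega)]
    simp
  | succ n ih =>
    intro e hk he rest s hrest
    rw [PySem.List.pyRange_one_cons (by omega)]
    simp only [List.cons_append, runsAux]
    exact ih (e+1) (by omega) (by omega) rest s hrest

theorem runs_range_cons (a m : Int) (rest : List Int) (h : a ≤ m)
    (hr : ∀ h' ∈ rest.head?, h' ≠ m + 1) :
    runs (PySem.List.pyRange a (m+1) 1 ++ rest) = fmtRunB a m :: runs rest := by
  rw [PySem.List.pyRange_one_cons (by omega)]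
  simp only [List.cons_append, runs]
  rw [runsAux_range m (m - a).toNat a rfl h rest a hr]
  cases rest with
  | nil => simp [runsAux]
  | cons v vs =>
    have hv : v ≠ m + 1 := hr v rfl
    simp [runsAux, hv]

-- the heart: A's gap slicing over [lo..hi] formats exactly the runs of the kept values
theorem main_flat (lo hi : Int) (p : Int → Bool) (hph : p hi = true) :
    ∀ (cs : List Int), ∀ (s : Int), 0 ≤ s → lo + s ≤ hi →
    cs = (PySem.List.pyRange (lo+s) (hi+1) 1).filter (fun x => !p x) →
    (sliceOut (PySem.List.pyRange lo (hi+1) 1) cs s).flatMap fmtSliceA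
      = runs ((PySem.List.pyRange (lo+s) (hi+1) 1).filter p) := by
  intro cs
  induction cs with
  | nil =>
    intro s hs hsh hcs
    have hall : ∀ x ∈ PySem.List.pyRange (lo+s) (hi+1) 1, p x := by
      intro x hx
      have := (List.filter_eq_nil_iff.mp hcs.symm) x hx
      simpa using this
    rw [List.filter_eq_self.mpr (fun a ha => hall a ha)]
    simp only [sliceOut, List.flatMap_cons, List.flatMap_nil, List.append_nil]
    rw [slice_from_pyRange lo (hi+1) s hs (by omega)]
    rw [fmtSliceA_range (lo+s) hi hsh]
    have h2 := runs_range_cons (lo+s) hi [] hsh (by simp)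
    simp only [List.append_nil, runs] at h2
    exact h2.symm
  | cons i cs' ih =>
    intro s hs hsh hcs
    obtain ⟨l₁, l₂, hsplit, hl₁p, hpi, hl₂⟩ := List.filter_eq_cons_iff.mp hcs.symm
    have hpi' : p i = false := by simpa using hpi
    have hgetl : (l₁ ++ i :: l₂)[l₁.length]? = some i := by simp
    have hlen : (PySem.List.pyRange (lo+s) (hi+1) 1).length = l₁.length + 1 + l₂.length := by
      rw [hsplit]; simp; omega
    have hlenr : (hi + 1 - (lo + s)).toNat = l₁.length + 1 + l₂.length := by
      rw [← PySem.List.length_pyRange_one (lo+s) (hi+1)]; exact hlen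
    have hgetr : (PySem.List.pyRange (lo+s) (hi+1) 1)[l₁.length]? = some i := by
      rw [hsplit]; exact hgetl
    have hival : i = lo + s + l₁.length := by
      rw [PySem.List.getElem?_pyRange_one, if_pos (by omega)] at hgetr
      have := Option.some_inj.mp hgetr
      omega
    have hil : lo + s ≤ i := by omega
    have hihi : i ≤ hi := by omega
    have hine : i ≠ hi := by intro h; rw [h, hph] at hpi'; exact Bool.noConfusion hpi'
    have hilt : i < hi := lt_of_le_of_ne hihi hine
    have hl₁ : l₁ = PySem.List.pyRange (lo+s) i 1 := by
      have ht : (PySem.List.pyRange (lo+s) (hi+1) 1).take l₁.length = l₁ := by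
        rw [hsplit]; exact List.take_left' rfl
      rw [pyRange_take (lo+s) (hi+1) l₁.length (by omega)] at ht
      rw [← ht, hival]
    have hl₂r : l₂ = PySem.List.pyRange (i+1) (hi+1) 1 := by
      have hd : (PySem.List.pyRange (lo+s) (hi+1) 1).drop (l₁.length + 1) = l₂ := by
        rw [hsplit, List.append_cons, List.drop_left' (by simp)]
      rw [pyRange_drop (lo+s) (hi+1) (l₁.length + 1) (by omega)] at hd
      rw [← hd]
      congr 1
      push_cast
      omega
    have hidx : PySem.List.index? (PySem.List.pyRange lo (hi+1) 1) i = some (i - lo).toNat :=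
      index?_pyRange lo (hi+1) i (by omega) (by omega)
    have hcast : (((i - lo).toNat : Nat) : Int) = i - lo := by omega
    simp only [sliceOut, hidx, Option.getD_some, hcast, List.flatMap_cons]
    rw [slice_pyRange lo (hi+1) s (i - lo) hs (by omega) (by omega)]
    have hlo_ilo : lo + (i - lo) = i := by omega
    rw [hlo_ilo]
    have hih := ih (i - lo + 1) (by omega) (by omega)
      (by rw [show lo + (i - lo + 1) = i + 1 by omega, ← hl₂r]; exact hl₂.symm)
    rw [show lo + (i - lo + 1) = i + 1 by omega] at hih
    rw [hih]
    have hfilter : (PySem.List.pyRange (lo+s) (hi+1) 1).filter p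
        = l₁ ++ (PySem.List.pyRange (i+1) (hi+1) 1).filter p := by
      rw [hsplit, List.filter_append, List.filter_cons_of_neg (by simp [hpi']),
          List.filter_eq_self.mpr (fun a ha => by simpa using hl₁p a ha), hl₂r]
    rw [hfilter]
    rcases eq_or_lt_of_le hil with heq | hlt
    · rw [hl₁, PySem.List.pyRange_one_eq_nil (by omega)]
      simp [fmtSliceA]
    · rw [hl₁]
      have hi1 : PySem.List.pyRange (lo+s) i 1 = PySem.List.pyRange (lo+s) ((i-1)+1) 1 := by
        congr 1; omega
      rw [hi1, fmtSliceA_range (lo+s) (i-1) (by omega)]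
      rw [runs_range_cons (lo+s) (i-1) _ (by omega) ?_]
      · simp
      · intro h' hh'
        have : h' ∈ PySem.List.pyRange (i+1) (hi+1) 1 :=
          List.mem_filter.mp (List.mem_of_mem_head? hh') |>.1
        rw [PySem.List.mem_pyRange_one] at this
        omega

theorem le_getLast_of_pairwise : ∀ (l : List Int) (hl : l ≠ []), l.Pairwise (· ≤ ·) →
    ∀ y ∈ l, y ≤ l.getLast hl := by
  intro l
  induction l with
  | nil => intro hl; exact absurd rfl hl
  | cons x t ih =>
    intro _ hp y hy
    cases t with
    | nil => simp at hy; simp [hy]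
    | cons z zs =>
      rw [List.getLast_cons (by simp)]
      rcases List.mem_cons.mp hy with rfl | hyt
      · exact le_trans (List.rel_of_pairwise_cons hp (List.getLast_mem _)) (le_refl _)
      · exact ih (by simp) hp.of_cons y hyt

-- ===== VERDICT (by name: the statement is the Claim_ definition above) =====
theorem get_consecutive_integer_series_spec : Claim_equal_get_consecutive_integer_series := by
  intro l _ hpre
  unfold Spec_get_consecutive_integer_series
  -- the sorted input is nonempty: a :: t
  obtain ⟨a, t, hc⟩ : ∃ a t, PySem.List.sorted l (fun x => x) false = a :: t := by
    cases h : PySem.List.sorted l (fun x => x) false with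
    | nil => rw [PySem.List.sorted_eq_nil_iff] at h; exact absurd h hpre
    | cons a t => exact ⟨a, t, rfl⟩
  set hi := (a :: t).getLast (by simp) with hhi_def
  have h0 : PySem.List.pyGet? (PySem.List.sorted l (fun x => x) false) 0 = some a := by
    rw [hc, PySem.List.pyGet?_zero]; simp
  have h1 : PySem.List.pyGet? (PySem.List.sorted l (fun x => x) false) (-1) = some hi := by
    rw [hc, PySem.List.pyGet?_neg_one, List.getLast?_eq_some_getLast]
  have hmem : ∀ y, y ∈ (a :: t) ↔ y ∈ l := by
    intro y; rw [← hc, PySem.List.mem_sorted]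
  have hpair : (a :: t).Pairwise (· ≤ ·) := by
    have := PySem.List.sorted_pairwise l (fun x => x)
    rw [hc] at this
    simpa using this
  have hlo : ∀ y ∈ l, a ≤ y := by
    intro y hy
    have := PySem.List.key_head_sorted_le l (fun x => x) hc y hy
    simpa using this
  have hhib : ∀ y ∈ l, y ≤ hi := by
    intro y hy
    exact le_getLast_of_pairwise (a :: t) (by simp) hpair y ((hmem y).mpr hy)
  have ha_mem : a ∈ l := (hmem a).mp (List.mem_cons_self)
  have hhi_mem : hi ∈ l := (hmem hi).mp (List.getLast_mem _)
  have hlohi : a ≤ hi := hlo hi hhi_mem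
  have hph : (fun x => decide (x ∈ l)) hi = true := by simp [hhi_mem]
  -- sorted(set(l)) is the filter of the kept values over the range
  have hU : PySem.List.sorted (PySem.Set.ofList l) (fun x => x) false
      = (PySem.List.pyRange a (hi+1) 1).filter (fun x => decide (x ∈ l)) := by
    apply PySem.List.sorted_eq_of_perm_of_pairwise_lt
    · rw [List.perm_ext_iff_of_nodup (List.Nodup.filter _ (PySem.List.nodup_pyRange_one a (hi+1))) (PySem.Set.nodup_ofList l)]
      intro x
      rw [List.mem_filter, PySem.Set.mem_ofList, PySem.List.mem_pyRange_one]
      constructor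
      · rintro ⟨-, hx⟩; simpa using hx
      · intro hx
        exact ⟨⟨hlo x hx, by have := hhib x hx; omega⟩, by simpa using hx⟩
    · exact List.Pairwise.sublist List.filter_sublist (PySem.List.pairwise_lt_pyRange_one a (hi+1))
  -- sorted(set(range) - set(sorted(l))) is the filter of the missing values
  have hcs : PySem.List.sorted
        (PySem.Set.diff (PySem.Set.ofList (PySem.List.pyRange a (hi+1) 1))
          (PySem.Set.ofList (PySem.List.sorted l (fun x => x) false))) (fun x => x) false
      = (PySem.List.pyRange a (hi+1) 1).filter (fun x => !(decide (x ∈ l))) := by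
    apply PySem.List.sorted_eq_of_perm_of_pairwise_lt
    · rw [List.perm_ext_iff_of_nodup (List.Nodup.filter _ (PySem.List.nodup_pyRange_one a (hi+1)))
        (PySem.Set.nodup_diff _ _ (PySem.Set.nodup_ofList _))]
      intro x
      rw [List.mem_filter, PySem.Set.mem_diff, PySem.Set.mem_ofList, PySem.Set.mem_ofList,
          PySem.List.mem_sorted]
      constructor
      · rintro ⟨hxb, hx⟩
        exact ⟨by rwa [PySem.List.mem_pyRange_one] at hxb ⊢, by simpa using hx⟩
      · rintro ⟨hxb, hx⟩
        exact ⟨hxb, by simpa using hx⟩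
    · exact List.Pairwise.sublist List.filter_sublist (PySem.List.pairwise_lt_pyRange_one a (hi+1))
  rw [alt_eq_runs, hU]
  unfold get_consecutive_integer_series
  simp only [h0, h1]
  rw [hcs]
  rw [foldA_eq_sliceOut (PySem.List.pyRange a (hi+1) 1)
    ((PySem.List.pyRange a (hi+1) 1).filter (fun x => !(decide (x ∈ l)))) [] 0]
  rw [PySem.List.foldl_append_eq_flatMap fmtSliceA]
  simp only [List.nil_append]
  have hmain := main_flat a hi (fun x => decide (x ∈ l)) hph
    ((PySem.List.pyRange a (hi+1) 1).filter (fun x => !(decide (x ∈ l)))) 0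
    (le_refl 0) (by omega) (by rw [add_zero])
  rw [add_zero] at hmain
  exact hmain
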